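-- pv_equiv track=rewrite | github.com/q-horton/advent-of-code | 2025/Day 11/code.py | paths_from_node
-- ===== SOURCE A (Python) =====
-- def paths_from_node(sys_map, node, cache):
--     if node == "out":
--         return 1, cache
--     if node in cache:
--         return cache[node], cache
--     count = 0
--     for next_node in sys_map[node]:
--         num_paths, cache = paths_from_node(sys_map, next_node, cache)
--         count += num_paths
--     cache[node] = count
--     return count, cache
-- ===== SOURCE B (Python) =====
-- def paths_from_node(sys_map, node, cache):
--     # Iterative DFS with an explicit frame stack instead of recursion.
--     if node == "out":
--         return 1, cache
--     if node in cache: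
--         return cache[node], cache
--     # frame = [node, remaining successors, partial count]
--     stack = [[node, list(sys_map[node]), 0]]
--     ret = None
--     while stack:
--         top = stack[-1]
--         if ret is not None:
--             top[2] += ret
--             ret = None
--         if not top[1]:
--             stack.pop()
--             cache[top[0]] = top[2]
--             ret = top[2]
--         else:
--             s = top[1].pop(0)
--             if s == "out":
--                 top[2] += 1
--             elif s in cache:
--                 top[2] += cache[s]
--             else:
--                 stack.append([s, list(sys_map[s]), 0])
--     return ret, cache
-- ===== Notes on version B (the rewrite author's own statement) =====
-- stated objective: alternative
-- what changed: Replaces A's recursive DFS with an iterative post-order DFS that drives an explicit stack of (node, remaining-successors, partial-count) frames and threads finished counts to parent frames, keeping the identical cache mutation order.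
import Mathlib
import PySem

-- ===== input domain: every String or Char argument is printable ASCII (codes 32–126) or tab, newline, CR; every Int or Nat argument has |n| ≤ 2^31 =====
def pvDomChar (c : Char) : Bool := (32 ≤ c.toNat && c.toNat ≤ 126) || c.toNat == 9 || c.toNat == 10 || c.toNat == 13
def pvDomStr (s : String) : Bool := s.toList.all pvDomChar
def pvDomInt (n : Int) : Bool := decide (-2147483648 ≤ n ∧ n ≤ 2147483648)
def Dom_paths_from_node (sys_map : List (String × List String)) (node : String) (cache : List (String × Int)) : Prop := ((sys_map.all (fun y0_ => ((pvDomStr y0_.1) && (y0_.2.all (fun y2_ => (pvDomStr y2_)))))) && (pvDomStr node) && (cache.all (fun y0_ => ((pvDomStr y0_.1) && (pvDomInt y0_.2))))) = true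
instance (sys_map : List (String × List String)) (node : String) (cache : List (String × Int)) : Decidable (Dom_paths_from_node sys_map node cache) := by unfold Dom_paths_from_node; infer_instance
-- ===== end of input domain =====

-- B is an explicit-frame-stack iterative DFS replacing A's recursion; equal return value AND the same
-- in-place cache mutation (both write cache[n] in completion order); objective: alternative.

-- ===== PORT A =====
-- A is recursive with no structural measure (the graph may be cyclic), so the port carries a fuel
-- argument; fuel sys_map.length + 1 is proved sufficient on Pre_ (lemma pathsARec_total below).
mutual
def pathsARec : Nat → PySem.Dict String (List String) → String → PySem.Dict String Int → Option (Int × PySem.Dict String Int)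
  | 0, _, _, _ => none
  | f+1, m, n, c =>
    if n == "out" then some (1, c)
    else if c.contains n then some (c.getD n 0, c)   -- cache[node]: present since contains
    else
      match m.get? n with
      | none => none                                  -- KeyError: excluded by Pre_
      | some l =>
        match pathsALoop f m l 0 c with
        | none => none
        | some (cnt, c1) => some (cnt, c1.insert n cnt)
  termination_by f _ _ _ => (f, 0)
  decreasing_by apply Prod.Lex.left; omega
def pathsALoop : Nat → PySem.Dict String (List String) → List String → Int → PySem.Dict String Int → Option (Int × PySem.Dict String Int)
  | _, _, [], acc, c => some (acc, c)
  | f, m, s :: l, acc, c =>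
    match pathsARec f m s c with
    | none => none
    | some (v, c0) => pathsALoop f m l (acc + v) c0
  termination_by f _ l _ _ => (f, l.length + 1)
  decreasing_by
    all_goals apply Prod.Lex.right' <;> (simp; try omega)
end

def paths_from_node (sys_map : List (String × List String)) (node : String) (cache : List (String × Int)) : Int × (List (String × Int)) :=
  match pathsARec (sys_map.length + 1) (PySem.Dict.mk sys_map) node (PySem.Dict.mk cache) with
  | some (v, c) => (v, c.items)
  | none => (0, [])

-- ===== PORT B =====
-- frame = (node, remaining successors, partial count); ret threads a finished frame's count to its
-- parent; stepB is one iteration of Source B's while loop, execB iterates it (fuel is only a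
-- totalization device, proved sufficient on Pre_).
def stepB (m : PySem.Dict String (List String)) (st : List (String × List String × Int))
    (ret : Option Int) (c : PySem.Dict String Int) :
    Sum (Option (Int × PySem.Dict String Int)) (List (String × List String × Int) × Option Int × PySem.Dict String Int) :=
  match st with
  | [] =>
    .inl (match ret with | some v => some (v, c) | none => none)
  | (n, rem, acc0) :: rest =>
    let acc := match ret with | some v => acc0 + v | none => acc0
    match rem with
    | [] => .inr (rest, some acc, c.insert n acc)
    | s :: rem' =>
      if s == "out" then .inr ((n, rem', acc + 1) :: rest, none, c)
      else if c.contains s then .inr ((n, rem', acc + c.getD s 0) :: rest, none, c)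
      else
        match m.get? s with
        | none => .inl none                           -- KeyError: excluded by Pre_
        | some l => .inr ((s, l, 0) :: (n, rem', acc) :: rest, none, c)

def execB : Nat → PySem.Dict String (List String) → List (String × List String × Int) → Option Int → PySem.Dict String Int → Option (Int × PySem.Dict String Int)
  | 0, _, _, _, _ => none
  | f+1, m, st, ret, c =>
    match stepB m st ret c with
    | .inl res => res
    | .inr (st', ret', c') => execB f m st' ret' c'

def maxSucc (sys_map : List (String × List String)) : Nat :=
  sys_map.foldr (fun p r => max p.2.length r) 0

-- step budget for the stack machine (proved sufficient on Pre_); the machine halts as soon as the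
-- stack empties, so the size of this number costs nothing at run time
def Cf : Nat → Nat → Nat
  | 0, _ => 2
  | f+1, M => Cf f M * M + 2

def paths_from_node_alt (sys_map : List (String × List String)) (node : String) (cache : List (String × Int)) : Int × (List (String × Int)) :=
  let m := PySem.Dict.mk sys_map
  let c := PySem.Dict.mk cache
  if node == "out" then (1, cache)
  else if c.contains node then (c.getD node 0, cache)
  else
    match m.get? node with
    | none => (0, [])
    | some l =>
      match execB (Cf sys_map.length (maxSucc sys_map) * maxSucc sys_map + 2) m [(node, l, 0)] none c with
      | some (v, c') => (v, c'.items)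
      | none => (0, [])

-- ===== PRECONDITION & SPEC =====
def resolvedD (c : PySem.Dict String Int) (n : String) : Bool := n == "out" || c.contains n

def goodKeyD (m : PySem.Dict String (List String)) (c : PySem.Dict String Int) (done : List String) (n : String) : Bool :=
  match m.get? n with
  | some l => l.all (fun s => resolvedD c s || done.contains s)
  | none => false

-- the keys whose whole dependency dag is present and acyclic (Kahn-style rounds)
def doneND (m : PySem.Dict String (List String)) (c : PySem.Dict String Int) : Nat → List String
  | 0 => []
  | k+1 => (m.items.map Prod.fst).filter (goodKeyD m c (doneND m c k))

-- Pre_ excludes (a) inputs on which Python A raises (KeyError on a missing key, or unbounded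
-- recursion on a cycle): exactly those with node unresolved and outside doneND; and (b) assoc lists
-- with duplicate keys in either dict argument, which do not denote a Python dict (Python keeps the
-- last value for a duplicated key, an assoc-list port reads the first), although A returns there.
def Pre_paths_from_node (sys_map : List (String × List String)) (node : String) (cache : List (String × Int)) : Prop :=
  (sys_map.map Prod.fst).Nodup ∧ (cache.map Prod.fst).Nodup ∧
  (resolvedD (PySem.Dict.mk cache) node = true ∨
    node ∈ doneND (PySem.Dict.mk sys_map) (PySem.Dict.mk cache) sys_map.length)
instance (sys_map : List (String × List String)) (node : String) (cache : List (String × Int)) : Decidable (Pre_paths_from_node sys_map node cache) := by unfold Pre_paths_from_node; infer_instance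

def pvWitness_paths_from_node : (List (String × List String)) × String × (List (String × Int)) :=
  ([("in", ["mid", "out"]), ("mid", ["out", "out"])], "in", [])

def Spec_paths_from_node (sys_map : List (String × List String)) (node : String) (cache : List (String × Int)) (out : Int × (List (String × Int))) : Prop := out = paths_from_node_alt sys_map node cache
instance (sys_map : List (String × List String)) (node : String) (cache : List (String × Int)) (out : Int × (List (String × Int))) : Decidable (Spec_paths_from_node sys_map node cache out) := by unfold Spec_paths_from_node; infer_instance

-- ===== CLAIM (what is proved, stated in full; the proofs are below) =====
def Claim_equal_paths_from_node : Prop := ∀ (sys_map : List (String × List String)) (node : String) (cache : List (String × Int)), Dom_paths_from_node sys_map node cache → Pre_paths_from_node sys_map node cache → Spec_paths_from_node sys_map node cache (paths_from_node sys_map node cache)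

-- ===== LEMMAS AND PROOFS =====

-- cache extension (A and B only ever add keys)
def DExt (c c' : PySem.Dict String Int) : Prop := ∀ x, c.contains x = true → c'.contains x = true

theorem DExt.refl (c : PySem.Dict String Int) : DExt c c := fun _ h => h

theorem DExt.trans {a b c : PySem.Dict String Int} (h1 : DExt a b) (h2 : DExt b c) : DExt a c :=
  fun x h => h2 x (h1 x h)

theorem DExt.insert (c : PySem.Dict String Int) (k : String) (v : Int) : DExt c (c.insert k v) := by
  intro x h
  rw [PySem.Dict.contains_insert]
  simp [h]

theorem maxSucc_bound (sys_map : List (String × List String)) (n : String) (l : List String)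
    (h : (PySem.Dict.mk sys_map).get? n = some l) : l.length ≤ maxSucc sys_map := by
  induction sys_map with
  | nil => simp [PySem.Dict.get?] at h
  | cons p rest ih =>
    rw [PySem.Dict.get?_mk_cons] at h
    by_cases hp : p.1 == n
    · simp [hp] at h
      subst h
      simp [maxSucc]
    · simp [hp] at h
      have := ih h
      simp [maxSucc] at this ⊢
      omega

theorem Cf_ge_two (F M : Nat) : 2 ≤ Cf F M := by
  cases F <;> simp [Cf]

theorem execB_succ (m : PySem.Dict String (List String)) :
    ∀ (f : Nat) (st : List (String × List String × Int)) (ret : Option Int)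
      (c : PySem.Dict String Int) (r : Int × PySem.Dict String Int),
      execB f m st ret c = some r → execB (f + 1) m st ret c = some r := by
  intro f
  induction f with
  | zero => intro st ret c r h; simp [execB] at h
  | succ f ih =>
    intro st ret c r h
    rw [execB] at h ⊢
    cases hs : stepB m st ret c with
    | inl res => rw [hs] at h; exact h
    | inr p => rw [hs] at h; obtain ⟨st', ret', c'⟩ := p; exact ih _ _ _ _ h

theorem execB_le (m : PySem.Dict String (List String))
    {f g : Nat} (hfg : f ≤ g) (st : List (String × List String × Int)) (ret : Option Int)
    (c : PySem.Dict String Int) (r : Int × PySem.Dict String Int)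
    (h : execB f m st ret c = some r) : execB g m st ret c = some r := by
  induction hfg with
  | refl => exact h
  | step _ ih => exact execB_succ m _ st ret c r ih

theorem stepB_retFold (m : PySem.Dict String (List String)) (n : String)
    (rem : List String) (acc0 : Int) (rest : List (String × List String × Int)) (v : Int)
    (c : PySem.Dict String Int) :
    stepB m ((n, rem, acc0) :: rest) (some v) c = stepB m ((n, rem, acc0 + v) :: rest) none c := by
  cases rem <;> rfl

theorem execB_retFold (m : PySem.Dict String (List String)) (f : Nat) (n : String)
    (rem : List String) (acc0 : Int) (rest : List (String × List String × Int)) (v : Int)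
    (c : PySem.Dict String Int) :
    execB f m ((n, rem, acc0) :: rest) (some v) c = execB f m ((n, rem, acc0 + v) :: rest) none c := by
  cases f with
  | zero => rfl
  | succ f => rw [execB, execB, stepB_retFold]

theorem resolvedD_mono {c c' : PySem.Dict String Int} (h : DExt c c') (s : String)
    (hs : resolvedD c s = true) : resolvedD c' s = true := by
  simp only [resolvedD, Bool.or_eq_true] at hs ⊢
  rcases hs with h1 | h1
  · exact Or.inl h1
  · exact Or.inr (h s h1)

theorem pathsA_total (m : PySem.Dict String (List String)) (c0 : PySem.Dict String Int) :
    ∀ (k : Nat) (c : PySem.Dict String Int), DExt c0 c → ∀ n : String,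
      (resolvedD c n = true ∨ n ∈ doneND m c0 k) →
      ∃ v c', pathsARec (k + 1) m n c = some (v, c') ∧ DExt c c' := by
  intro k
  induction k with
  | zero =>
    intro c _ n hn
    have hres : resolvedD c n = true := by
      rcases hn with h | h
      · exact h
      · simp [doneND] at h
    by_cases hout : (n == "out") = true
    · exact ⟨1, c, by simp [pathsARec, hout], DExt.refl c⟩
    · have hcon : c.contains n = true := by
        simp [resolvedD, hout] at hres
        exact hres
      exact ⟨c.getD n 0, c, by simp [pathsARec, hout, hcon], DExt.refl c⟩
  | succ k ih =>
    intro c hc n hn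
    by_cases hout : (n == "out") = true
    · exact ⟨1, c, by simp [pathsARec, hout], DExt.refl c⟩
    by_cases hcon : c.contains n = true
    · exact ⟨c.getD n 0, c, by simp [pathsARec, hout, hcon], DExt.refl c⟩
    have hdone : n ∈ doneND m c0 (k + 1) := by
      rcases hn with h | h
      · simp [resolvedD, hout, hcon] at h
      · exact h
    rw [doneND] at hdone
    obtain ⟨hkeys, hgood⟩ := List.mem_filter.mp hdone
    cases hget : m.get? n with
    | none => simp [goodKeyD, hget] at hgood
    | some l =>
      have hall : ∀ s ∈ l, resolvedD c0 s = true ∨ s ∈ doneND m c0 k := by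
        simpa [goodKeyD, hget] using hgood
      have loop : ∀ (l' : List String), (∀ s ∈ l', resolvedD c0 s = true ∨ s ∈ doneND m c0 k) →
          ∀ (acc : Int) (c1 : PySem.Dict String Int), DExt c0 c1 →
          ∃ cnt c2, pathsALoop (k + 1) m l' acc c1 = some (cnt, c2) ∧ DExt c1 c2 := by
        intro l'
        induction l' with
        | nil => intro _ acc c1 _; exact ⟨acc, c1, by simp [pathsALoop], DExt.refl c1⟩
        | cons s ls ihl =>
          intro hall' acc c1 hext
          have hs' : resolvedD c1 s = true ∨ s ∈ doneND m c0 k := by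
            rcases hall' s (by simp) with h | h
            · exact Or.inl (resolvedD_mono hext s h)
            · exact Or.inr h
          obtain ⟨v, c2, hrec, hext2⟩ := ih c1 hext s hs'
          obtain ⟨cnt, c3, hloop, hext3⟩ :=
            ihl (fun t ht => hall' t (by simp [ht])) (acc + v) c2 (DExt.trans hext hext2)
          refine ⟨cnt, c3, ?_, DExt.trans hext2 hext3⟩
          simp only [pathsALoop]
          rw [hrec]
          exact hloop
      obtain ⟨cnt, c2, hloop, hext2⟩ := loop l hall 0 c hc
      refine ⟨cnt, c2.insert n cnt, ?_, DExt.trans hext2 (DExt.insert c2 n cnt)⟩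
      simp only [pathsARec]
      simp [hout, hcon, hget, hloop]

theorem execB_sim (m : PySem.Dict String (List String)) (M : Nat)
    (hM : ∀ s l, m.get? s = some l → l.length ≤ M) :
    ∀ (F : Nat) (l : List String) (acc : Int) (c : PySem.Dict String Int) (cnt : Int)
      (c1 : PySem.Dict String Int),
      pathsALoop F m l acc c = some (cnt, c1) →
      ∀ (n : String) (rest : List (String × List String × Int)) (g : Nat)
        (r : Int × PySem.Dict String Int),
        execB g m ((n, ([] : List String), cnt) :: rest) none c1 = some r →
        execB (Cf F M * l.length + g) m ((n, l, acc) :: rest) none c = some r := by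
  intro F
  induction F with
  | zero =>
    intro l acc c cnt c1 h n rest g r hcont
    cases l with
    | nil =>
      simp only [pathsALoop, Option.some.injEq, Prod.mk.injEq] at h
      obtain ⟨h1, h2⟩ := h
      subst h1; subst h2
      simpa using hcont
    | cons s ls => simp [pathsALoop, pathsARec] at h
  | succ F ihF =>
    intro l
    induction l with
    | nil =>
      intro acc c cnt c1 h n rest g r hcont
      simp only [pathsALoop, Option.some.injEq, Prod.mk.injEq] at h
      obtain ⟨h1, h2⟩ := h
      subst h1; subst h2
      simpa using hcont
    | cons s ls ihl =>
      intro acc c cnt c1 h n rest g r hcont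
      cases hA : pathsARec (F + 1) m s c with
      | none => rw [pathsALoop, hA] at h; simp at h
      | some vc =>
        obtain ⟨v, c0'⟩ := vc
        rw [pathsALoop, hA] at h
        -- h : pathsALoop (F+1) m ls (acc + v) c0' = some (cnt, c1)
        by_cases hout2 : (s == "out") = true
        · have hv : v = 1 ∧ c0' = c := by
            have : some (1, c) = some (v, c0') := by rw [← hA]; simp [pathsARec, hout2]
            simpa [eq_comm] using this
          obtain ⟨hv1, hv2⟩ := hv
          subst hv1
          rw [hv2] at h
          have hrec := ihl (acc + 1) c cnt c1 h n rest g r hcont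
          have hstep : execB (Cf (F+1) M * ls.length + g + 1) m ((n, s :: ls, acc) :: rest) none c = some r := by
            rw [execB]
            have hs1 : stepB m ((n, s :: ls, acc) :: rest) none c
                = .inr ((n, ls, acc + 1) :: rest, none, c) := by simp [stepB, hout2]
            rw [hs1]
            exact hrec
          refine execB_le m ?_ _ _ _ _ hstep
          have h2 := Cf_ge_two (F+1) M
          rw [List.length_cons, Nat.mul_succ]
          omega
        · by_cases hcon2 : c.contains s = true
          · have hv : v = c.getD s 0 ∧ c0' = c := by
              have : some (c.getD s 0, c) = some (v, c0') := by
                rw [← hA]; simp [pathsARec, hout2, hcon2]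
              simpa [eq_comm] using this
            obtain ⟨hv1, hv2⟩ := hv
            subst hv1
            rw [hv2] at h
            have hrec := ihl (acc + c.getD s 0) c cnt c1 h n rest g r hcont
            have hstep : execB (Cf (F+1) M * ls.length + g + 1) m ((n, s :: ls, acc) :: rest) none c = some r := by
              rw [execB]
              have hs1 : stepB m ((n, s :: ls, acc) :: rest) none c
                  = .inr ((n, ls, acc + c.getD s 0) :: rest, none, c) := by simp [stepB, hout2, hcon2]
              rw [hs1]
              exact hrec
            refine execB_le m ?_ _ _ _ _ hstep
            have h2 := Cf_ge_two (F+1) M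
            rw [List.length_cons, Nat.mul_succ]
            omega
          · cases hget : m.get? s with
            | none => simp [pathsARec, hout2, hcon2, hget] at hA
            | some ls2 =>
              cases hl2 : pathsALoop F m ls2 0 c with
              | none => simp [pathsARec, hout2, hcon2, hget, hl2] at hA
              | some p =>
                obtain ⟨w, cc⟩ := p
                have hv : v = w ∧ c0' = cc.insert s w := by
                  have : some (w, cc.insert s w) = some (v, c0') := by
                    rw [← hA]; simp [pathsARec, hout2, hcon2, hget, hl2]
                  simpa [eq_comm] using this
                obtain ⟨hv1, hv2⟩ := hv
                rw [hv1, hv2] at h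
                have hcont2 : execB (Cf (F+1) M * ls.length + g + 1) m
                    ((s, ([] : List String), w) :: (n, ls, acc) :: rest) none cc = some r := by
                  rw [execB]
                  have hs2 : stepB m ((s, ([] : List String), w) :: (n, ls, acc) :: rest) none cc
                      = .inr ((n, ls, acc) :: rest, some w, cc.insert s w) := by simp [stepB]
                  rw [hs2]
                  show execB (Cf (F+1) M * ls.length + g) m ((n, ls, acc) :: rest) (some w)
                    (cc.insert s w) = some r
                  rw [execB_retFold]
                  exact ihl (acc + w) (cc.insert s w) cnt c1 h n rest g r hcont
                have hpush := ihF ls2 0 c w cc hl2 s ((n, ls, acc) :: rest)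
                  (Cf (F+1) M * ls.length + g + 1) r hcont2
                have hstep : execB (Cf F M * ls2.length + (Cf (F+1) M * ls.length + g + 1) + 1) m
                    ((n, s :: ls, acc) :: rest) none c = some r := by
                  rw [execB]
                  have hs3 : stepB m ((n, s :: ls, acc) :: rest) none c
                      = .inr ((s, ls2, 0) :: (n, ls, acc) :: rest, none, c) := by
                    simp [stepB, hout2, hcon2, hget]
                  rw [hs3]
                  exact hpush
                refine execB_le m ?_ _ _ _ _ hstep
                have hb := Nat.mul_le_mul_left (Cf F M) (hM s ls2 hget)
                have hC : Cf (F+1) M = Cf F M * M + 2 := rfl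
                rw [List.length_cons, Nat.mul_succ]
                omega

-- ===== VERDICT (by name: the statement is the Claim_ definition above) =====
theorem paths_from_node_spec : Claim_equal_paths_from_node := by
  unfold Claim_equal_paths_from_node
  intro sys_map node cache _ hpre
  unfold Spec_paths_from_node
  obtain ⟨-, -, hres⟩ := hpre
  by_cases hout : (node == "out") = true
  · simp [paths_from_node, paths_from_node_alt, pathsARec, hout]
  · by_cases hcon : (PySem.Dict.mk cache).contains node = true
    · simp [paths_from_node, paths_from_node_alt, pathsARec, hout, hcon]
    · have hdone : node ∈ doneND (PySem.Dict.mk sys_map) (PySem.Dict.mk cache) sys_map.length := by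
        rcases hres with h | h
        · simp [resolvedD, hout, hcon] at h
        · exact h
      obtain ⟨v, c', hA, -⟩ := pathsA_total (PySem.Dict.mk sys_map) (PySem.Dict.mk cache)
        sys_map.length (PySem.Dict.mk cache) (DExt.refl _) node (Or.inr hdone)
      cases hget : (PySem.Dict.mk sys_map).get? node with
      | none => simp [pathsARec, hout, hcon, hget] at hA
      | some l =>
        cases hl : pathsALoop sys_map.length (PySem.Dict.mk sys_map) l 0 (PySem.Dict.mk cache) with
        | none => simp [pathsARec, hout, hcon, hget, hl] at hA
        | some p =>
          obtain ⟨w, cc⟩ := p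
          have hcont : execB 2 (PySem.Dict.mk sys_map) [(node, ([] : List String), w)] none cc
              = some (w, cc.insert node w) := rfl
          have hsim := execB_sim (PySem.Dict.mk sys_map) (maxSucc sys_map)
            (fun s l h => maxSucc_bound sys_map s l h) sys_map.length l 0 (PySem.Dict.mk cache)
            w cc hl node [] 2 (w, cc.insert node w) hcont
          have hfin : execB (Cf sys_map.length (maxSucc sys_map) * maxSucc sys_map + 2)
              (PySem.Dict.mk sys_map) [(node, l, 0)] none (PySem.Dict.mk cache)
              = some (w, cc.insert node w) := by
            refine execB_le _ ?_ _ _ _ _ hsim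
            have h1 := Nat.mul_le_mul_left (Cf sys_map.length (maxSucc sys_map))
              (maxSucc_bound sys_map node l hget)
            simp at hsim ⊢
            omega
          simp [paths_from_node, paths_from_node_alt, pathsARec, hout, hcon, hget, hl, hfin]
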